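-- pv_equiv track=rewrite | github.com/skyrimer/DBL-Micro-Soft | Final_code/_4_Conversations/conversation_algorithm.py | trace_conversation
-- ===== SOURCE A (Python) =====
-- def trace_conversation(start_tweet_id: str, tweet_dict: dict):
--     """
--     Trace a conversation starting from a given tweet ID in a dictionary of tweets.
--
--     Args:
--         start_tweet_id (str): The ID of the starting tweet.
--         tweet_dict (dict): A dictionary containing tweet IDs as keys
--             and tweet information as values.
--
--     Returns:
--         tuple: A tuple containing either the reversed conversation IDs
--             and users involved if 3 users are present, or None and users
--             involved if less than 3 users are present.
--     """
--
--     convo = []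
--     current_tweet_id = start_tweet_id
--     users_in_conversation = set()
--     local_processed_tweet_ids = set()  # Local set to track the current conversation
--     while (
--         current_tweet_id
--         and current_tweet_id in tweet_dict
--         and current_tweet_id not in local_processed_tweet_ids
--     ):
--         tweet_info = tweet_dict[current_tweet_id]
--         convo.append(current_tweet_id)
--         local_processed_tweet_ids.add(current_tweet_id)
--         users_in_conversation.add(tweet_info["user_id"])
--         if len(users_in_conversation) > 2:
--             users_in_conversation.remove(tweet_info["user_id"])
--             return (
--                 convo[:-1][::-1],
--                 users_in_conversation,
--             )
--         current_tweet_id = tweet_info["replied_tweet_id"]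
--     return (
--         (convo[::-1], users_in_conversation)
--         if len(users_in_conversation) == 2
--         else (None, users_in_conversation)
--     )
-- ===== SOURCE B (Python) =====
-- def _build_chain(start_tweet_id, tweet_dict):
--     """Phase 1: walk the reply chain, collecting (tweet_id, user_id) in order."""
--     chain = []
--     seen = set()
--     tid = start_tweet_id
--     while tid and tid in tweet_dict and tid not in seen:
--         info = tweet_dict[tid]
--         chain.append((tid, info["user_id"]))
--         seen.add(tid)
--         tid = info["replied_tweet_id"]
--     return chain
--
--
-- def trace_conversation(start_tweet_id: str, tweet_dict: dict):
--     """Two-phase rewrite: build the full chain, then classify it in one scan."""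
--     chain = _build_chain(start_tweet_id, tweet_dict)
--     users = set()
--     ids = []
--     for tweet_id, user in chain:
--         if user not in users and len(users) == 2:
--             return (ids[::-1], users)
--         users.add(user)
--         ids.append(tweet_id)
--     return (ids[::-1], users) if len(users) == 2 else (None, users)
-- ===== Notes on version B (the rewrite author's own statement) =====
-- stated objective: alternative
-- what changed: A interleaves traversal and user counting in one while-loop with an add-then-remove rollback at the 3-user boundary; B first materialises the whole reply chain as a list of (tweet_id, user_id) pairs and then classifies it in a separate scan that never mutates-and-rolls-back the user set.
import Mathlib
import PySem

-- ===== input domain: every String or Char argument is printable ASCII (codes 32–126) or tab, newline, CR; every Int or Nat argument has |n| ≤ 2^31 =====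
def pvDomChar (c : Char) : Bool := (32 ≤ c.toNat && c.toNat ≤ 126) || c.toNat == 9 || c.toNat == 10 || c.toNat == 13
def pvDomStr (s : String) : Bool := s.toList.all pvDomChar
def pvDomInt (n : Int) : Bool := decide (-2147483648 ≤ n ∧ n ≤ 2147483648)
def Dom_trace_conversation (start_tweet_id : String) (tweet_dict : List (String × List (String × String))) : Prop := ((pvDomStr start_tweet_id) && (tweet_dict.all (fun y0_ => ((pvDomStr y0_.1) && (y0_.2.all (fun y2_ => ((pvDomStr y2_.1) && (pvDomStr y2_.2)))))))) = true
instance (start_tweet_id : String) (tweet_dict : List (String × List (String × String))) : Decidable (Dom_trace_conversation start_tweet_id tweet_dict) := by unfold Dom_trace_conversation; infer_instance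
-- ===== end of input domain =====

-- B re-decomposes A's single interleaved while-loop into two phases (build the full
-- reply chain, then classify it in one scan); same cost, objective: alternative.

-- ===== PORT A =====
-- A's while-loop as fuel recursion; each iteration adds the (fresh) current id to
-- `seen`, whose ids all come from `tweet_dict`'s keys, so `tweet_dict.length + 1`
-- fuel is never exhausted and the fuel-0 arm (= the loop-exit return) is unreachable.
def traceLoopA (tweet_dict : List (String × List (String × String))) :
    Nat → String → List String → PySem.Set String → PySem.Set String →
    Option (List String) × List String
  | 0, _, convo, users, _ =>
      if PySem.Set.len users == 2 then (some convo.reverse, users) else (none, users)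
  | fuel+1, tid, convo, users, seen =>
      if (tid != "") && (PySem.Dict.get? ⟨tweet_dict⟩ tid).isSome
          && !(PySem.Set.contains seen tid) then
        let info := PySem.Dict.getD ⟨tweet_dict⟩ tid []
        let convo' := convo ++ [tid]
        let seen' := PySem.Set.add seen tid
        let u := PySem.Dict.getD ⟨info⟩ "user_id" ""            -- KeyError guarded by Pre_
        let users' := PySem.Set.add users u
        if 2 < PySem.Set.len users' then
          -- users_in_conversation.remove(u): u was just added, so remove? is some
          ((convo'.dropLast).reverse, (PySem.Set.remove? users' u).getD users')
        else
          traceLoopA tweet_dict fuel (PySem.Dict.getD ⟨info⟩ "replied_tweet_id" "")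
            convo' users' seen'
      else
        if PySem.Set.len users == 2 then (some convo.reverse, users) else (none, users)

def trace_conversation (start_tweet_id : String) (tweet_dict : List (String × List (String × String))) : Option (List String) × List String :=
  traceLoopA tweet_dict (tweet_dict.length + 1) start_tweet_id [] PySem.Set.empty PySem.Set.empty

-- ===== PORT B =====
-- phase 1 of Source B (_build_chain), same fuel bound as A's loop (never exhausted)
def buildChainB (tweet_dict : List (String × List (String × String))) :
    Nat → String → PySem.Set String → List (String × String)
  | 0, _, _ => []
  | fuel+1, tid, seen =>
      if (tid != "") && (PySem.Dict.get? ⟨tweet_dict⟩ tid).isSome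
          && !(PySem.Set.contains seen tid) then
        let info := PySem.Dict.getD ⟨tweet_dict⟩ tid []
        (tid, PySem.Dict.getD ⟨info⟩ "user_id" "") ::
          buildChainB tweet_dict fuel (PySem.Dict.getD ⟨info⟩ "replied_tweet_id" "")
            (PySem.Set.add seen tid)
      else []

-- phase 2 of Source B: one scan over the chain with a growing user set
def scanChainB : List (String × String) → PySem.Set String → List String →
    Option (List String) × List String
  | [], users, ids =>
      if PySem.Set.len users == 2 then (some ids.reverse, users) else (none, users)
  | (t, u) :: rest, users, ids =>
      if !(PySem.Set.contains users u) && PySem.Set.len users == 2 then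
        (some ids.reverse, users)
      else
        scanChainB rest (PySem.Set.add users u) (ids ++ [t])

def trace_conversation_alt (start_tweet_id : String) (tweet_dict : List (String × List (String × String))) : Option (List String) × List String :=
  scanChainB (buildChainB tweet_dict (tweet_dict.length + 1) start_tweet_id PySem.Set.empty)
    PySem.Set.empty []

-- ===== PRECONDITION & SPEC =====
-- A raises KeyError when a visited tweet's info dict lacks "user_id" or
-- "replied_tweet_id".  Pre_ requires those keys of EVERY entry (unless the walk
-- stops immediately because the start id is falsy or absent): this is slightly
-- narrower than A's exact domain — entries the chain never reaches may lack the
-- keys while A still returns — but it is checkable without re-running the walk.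
def Pre_trace_conversation (start_tweet_id : String) (tweet_dict : List (String × List (String × String))) : Prop :=
  start_tweet_id = "" ∨ (PySem.Dict.get? ⟨tweet_dict⟩ start_tweet_id).isNone ∨
    ∀ p ∈ tweet_dict, (PySem.Dict.get? ⟨p.2⟩ "user_id").isSome ∧
      (PySem.Dict.get? ⟨p.2⟩ "replied_tweet_id").isSome
instance (start_tweet_id : String) (tweet_dict : List (String × List (String × String))) : Decidable (Pre_trace_conversation start_tweet_id tweet_dict) := by unfold Pre_trace_conversation; infer_instance

def pvWitness_trace_conversation : String × (List (String × List (String × String))) :=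
  ("a", [("a", [("user_id", "u1"), ("replied_tweet_id", "b")]),
         ("b", [("user_id", "u2"), ("replied_tweet_id", "")])])

def Spec_trace_conversation (start_tweet_id : String) (tweet_dict : List (String × List (String × String))) (out : Option (List String) × List String) : Prop := out = trace_conversation_alt start_tweet_id tweet_dict
instance (start_tweet_id : String) (tweet_dict : List (String × List (String × String))) (out : Option (List String) × List String) : Decidable (Spec_trace_conversation start_tweet_id tweet_dict out) := by unfold Spec_trace_conversation; infer_instance

-- ===== CLAIM (what is proved, stated in full; the proofs are below) =====
def Claim_equal_trace_conversation : Prop := ∀ (start_tweet_id : String) (tweet_dict : List (String × List (String × String))), Dom_trace_conversation start_tweet_id tweet_dict → Pre_trace_conversation start_tweet_id tweet_dict → Spec_trace_conversation start_tweet_id tweet_dict (trace_conversation start_tweet_id tweet_dict)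

-- ===== LEMMAS AND PROOFS =====

lemma set_add_of_mem {s : PySem.Set String} {u : String}
    (h : PySem.Set.contains s u = true) : PySem.Set.add s u = s := by
  simp only [PySem.Set.add]; rw [if_pos h]

lemma set_add_of_not_mem {s : PySem.Set String} {u : String}
    (h : ¬ PySem.Set.contains s u = true) : PySem.Set.add s u = s ++ [u] := by
  simp only [PySem.Set.add]; rw [if_neg h]

lemma discard_append_self {s : PySem.Set String} {u : String}
    (h : ¬ PySem.Set.contains s u = true) : PySem.Set.discard (s ++ [u]) u = s := by
  simp only [PySem.Set.discard, List.filter_append]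
  have h1 : s.filter (fun y => !y == u) = s := by
    apply List.filter_eq_self.mpr
    intro a ha
    simp only [PySem.Set.contains, List.contains_eq_mem, decide_eq_true_eq] at h
    simp only [Bool.not_eq_eq_eq_not, Bool.not_true, beq_eq_false_iff_ne]
    exact fun he => h (he ▸ ha)
  simp [h1]

-- The key invariant: A's loop from state (tid, convo, users, seen) with at most two
-- users collected equals B's scan of the remaining chain from the same state.
lemma loopA_eq_scan (d : List (String × List (String × String))) :
    ∀ (fuel : Nat) (tid : String) (convo : List String)
      (users seen : PySem.Set String), users.length ≤ 2 →
      traceLoopA d fuel tid convo users seen =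
        scanChainB (buildChainB d fuel tid seen) users convo := by
  intro fuel
  induction fuel with
  | zero => intro tid convo users seen _; simp [traceLoopA, buildChainB, scanChainB]
  | succ n ih =>
    intro tid convo users seen hlen
    by_cases hc : ((tid != "") && (PySem.Dict.get? ⟨d⟩ tid).isSome
        && !(PySem.Set.contains seen tid)) = true
    · rw [traceLoopA, buildChainB, if_pos hc, if_pos hc]
      set info := PySem.Dict.getD ⟨d⟩ tid [] with hinfo
      set u := PySem.Dict.getD ⟨info⟩ "user_id" "" with hu
      rw [scanChainB]
      by_cases hm : PySem.Set.contains users u = true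
      · -- u already collected: set unchanged, both sides recurse
        have hadd : PySem.Set.add users u = users := set_add_of_mem hm
        have hnot : ¬ 2 < (PySem.Set.len (PySem.Set.add users u)) := by
          rw [hadd]; simp [PySem.Set.len]; exact_mod_cast hlen
        rw [if_neg hnot]
        have hm' : u ∈ users := by simpa [PySem.Set.contains] using hm
        rw [if_neg (by simp; intro hn; exact absurd hm' hn)]
        rw [hadd] at *
        exact ih _ _ users _ hlen
      · have hadd : PySem.Set.add users u = users ++ [u] := set_add_of_not_mem hm
        by_cases h2 : users.length = 2
        · -- third distinct user: A rolls back and returns, B returns before adding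
          have hgt : 2 < (PySem.Set.len (PySem.Set.add users u)) := by
            rw [hadd]; simp [PySem.Set.len]; omega
          rw [if_pos hgt]
          have hm' : u ∉ users := by simpa [PySem.Set.contains] using hm
          rw [if_pos (by simp [PySem.Set.len]; refine ⟨hm', ?_⟩; exact_mod_cast h2)]
          have hrem : (PySem.Set.remove? (PySem.Set.add users u) u).getD (PySem.Set.add users u) = users := by
            have hc' : PySem.Set.contains (PySem.Set.add users u) u = true := by
              rw [hadd]; simp [PySem.Set.contains]
            rw [PySem.Set.remove?, if_pos hc', Option.getD_some, hadd,
              discard_append_self hm]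
          rw [hrem]
          simp
        · -- still at most two users after adding: both sides recurse
          have hnot : ¬ 2 < (PySem.Set.len (PySem.Set.add users u)) := by
            rw [hadd]; simp [PySem.Set.len]; omega
          rw [if_neg hnot]
          rw [if_neg (by simp [PySem.Set.len]; intro _; exact_mod_cast h2)]
          exact ih _ _ _ _ (by rw [hadd]; simp; omega)
    · rw [traceLoopA, buildChainB, if_neg hc, if_neg hc, scanChainB]

-- ===== VERDICT (by name: the statement is the Claim_ definition above) =====
theorem trace_conversation_spec : Claim_equal_trace_conversation := by
  intro start_tweet_id tweet_dict _ _
  unfold Spec_trace_conversation trace_conversation trace_conversation_alt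
  exact loopA_eq_scan tweet_dict _ _ _ _ _ (by simp [PySem.Set.empty])
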